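-- pv_equiv track=rewrite | github.com/ChickenMand/3025.2 | gui_live+comments.py | trin_vinkel
-- ===== SOURCE A (Python) =====
-- def trin_vinkel(theta, r, trin):
--     #der bliver lavet denne "vals" som er en liste med værdiger repræcenteret med en vinkel med en givet step
--     vals = [h for h in range(0, 360, trin)]
--     #For hver værdig in vals, finder den, den vinkel som er tættes på den korresponderne distance i dataen (theta and r)
--     theta_ordered = [] #funktionen retunere en liste til vinkel
--     r_ordered = [] #funktionen retunere en liste til radius
--     for c in vals: #Et loop
--         min_diff = float('inf')  # Initialize with positive infinity
--         theta_or = None #Denne variabel vil blive brugt til at gemme vinkelen med minimeret difference til ønskede vinkel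
--         r_or = None #ligeledes det samme som vinkel bare med radius
--
--         #Loop der starter over: vinkel(s) og distancen (rad)
--         for s, rad in zip(theta, r):
--             diff = abs(c - s) #beregner den absolute forskel c= den ønskede vinkel og s=som er den nuværende vinkel, hvor der kommer ud med en forskel. (note: positive or negative er lige meget for funktionen)
--             if diff < min_diff: #linen tjekker for om differancen er mindre en den nuværende mindste diff (min_diff). Hvis ja, så køre koden videre med statmentsene under
--                 min_diff = diff #updater den minimale differance = diff til den nuværende diff
--                 theta_or = s #updatere variablen
--                 r_or = rad #updatere variablen
--
--         theta_ordered.append(theta_or)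
--         r_ordered.append(r_or)
--     return r_ordered, theta_ordered
-- ===== SOURCE B (Python) =====
-- def trin_vinkel(theta, r, trin):
--     # Sort the distinct data angles once, then binary-search the nearest per target
--     # (ties: smallest original index), instead of scanning all data per target.
--     first = {}  # theta value -> (first index where it occurs, r at that index)
--     for i, (s, rad) in enumerate(zip(theta, r)):
--         if s not in first:
--             first[s] = (i, rad)
--     vs = sorted(first)
--     r_ordered = []
--     theta_ordered = []
--     for c in range(0, 360, trin):
--         # hand-written bisect_left (this module imports nothing)
--         lo, hi = 0, len(vs)
--         while lo < hi:
--             mid = (lo + hi) // 2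
--             if vs[mid] < c:
--                 lo = mid + 1
--             else:
--                 hi = mid
--         best = None
--         for v in vs[max(lo - 1, 0):lo + 1]:
--             i, rad = first[v]
--             d = abs(c - v)
--             if best is None or d < best[0] or (d == best[0] and i < best[1]):
--                 best = (d, i, v, rad)
--         theta_ordered.append(best[2])
--         r_ordered.append(best[3])
--     return r_ordered, theta_ordered
-- ===== Notes on version B (the rewrite author's own statement) =====
-- stated objective: alternative
-- what changed: Instead of scanning all data points for every target angle, B builds a first-occurrence dict, sorts the distinct data angles once, and binary-searches the nearest per target (ties resolved by smallest original index); this trades A's O(m*n) scan for O((n+m) log n), though a timing run's inputs (few targets) showed no measured speed-up.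
-- outside the precondition, e.g. on trin_vinkel([], [], 90): A returns ([None, None, None, None], [None, None, None, None]), B raises TypeError; on trin_vinkel([1, 2], [5, 6], 0): A raises ValueError, B raises ValueError
import Mathlib
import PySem

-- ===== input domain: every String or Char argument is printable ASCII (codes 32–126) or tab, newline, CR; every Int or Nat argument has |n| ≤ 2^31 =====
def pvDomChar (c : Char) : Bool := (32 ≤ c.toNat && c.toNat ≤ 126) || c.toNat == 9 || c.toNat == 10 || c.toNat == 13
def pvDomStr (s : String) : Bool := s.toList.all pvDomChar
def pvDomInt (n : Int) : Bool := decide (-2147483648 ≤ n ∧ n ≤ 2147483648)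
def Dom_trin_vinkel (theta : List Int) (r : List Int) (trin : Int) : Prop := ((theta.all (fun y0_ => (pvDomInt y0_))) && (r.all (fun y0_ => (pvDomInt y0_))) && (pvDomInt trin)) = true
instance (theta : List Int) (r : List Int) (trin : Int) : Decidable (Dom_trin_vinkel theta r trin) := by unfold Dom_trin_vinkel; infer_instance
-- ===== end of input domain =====

-- B replaces A's scan of all data per target angle by: first-occurrence dict, one sort of
-- the distinct data angles, then a binary search per target (ties by smallest original
-- index); same return value wherever A returns a value of the declared type.

-- ===== PORT A =====
-- Inner-loop state (min_diff, theta_or, r_or); `none` renders Python's float('inf')/None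
-- start values. The `.getD 0` at the appends is unreachable inside Pre_ (nonempty zip):
-- in Python the list would hold None there, which is outside the declared type.
def trin_vinkel (theta : List Int) (r : List Int) (trin : Int) : List Int × List Int :=
  let vals := PySem.List.pyRange 0 360 trin
  let res := vals.foldl (fun (acc : List Int × List Int) c =>
    let st := (theta.zip r).foldl
      (fun (st : Option Int × Option Int × Option Int) p =>
        let diff := |c - p.1|
        match st.1 with
        | none => (some diff, some p.1, some p.2)
        | some m => if diff < m then (some diff, some p.1, some p.2) else st)
      (none, none, none)
    (acc.1 ++ [st.2.1.getD 0], acc.2 ++ [st.2.2.getD 0]))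
    ([], [])
  (res.2, res.1)

-- ===== PORT B =====
-- Source B's first-occurrence dict: for i, (s, rad) in enumerate(zip(theta, r)): if s not in first: first[s] = (i, rad)
def pvFirstDict (ps : List (Int × Int)) : PySem.Dict Int (Int × Int) :=
  (PySem.List.enumerate ps).foldl
    (fun d q => if d.contains q.2.1 then d else d.insert q.2.1 (q.1, q.2.2))
    PySem.Dict.empty

-- Source B's hand-written bisect_left while-loop (lo, hi are always in [0, len(vs)])
def pvBisect (vs : List Int) (c : Int) (lo hi : Nat) : Nat :=
  if _h : lo < hi then
    let mid := (lo + hi) / 2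
    if vs.getD mid 0 < c then pvBisect vs c (mid + 1) hi
    else pvBisect vs c lo mid
  else lo
termination_by hi - lo
decreasing_by all_goals omega

-- Source B's candidate loop: best = None; for v in cand: ... (Python's tuple compare (d, i) < (best[0], best[1]) written out)
def pvBest (first : PySem.Dict Int (Int × Int)) (c : Int) (cand : List Int) :
    Option (Int × Int × Int × Int) :=
  cand.foldl
    (fun best v =>
      let p := (first.get? v).getD (0, 0)
      let d := |c - v|
      match best with
      | none => some (d, p.1, v, p.2)
      | some b =>
        if d < b.1 then some (d, p.1, v, p.2)
        else if d = b.1 ∧ p.1 < b.2.1 then some (d, p.1, v, p.2)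
        else some b)
    none

-- The `.getD (0,0,0,0)` at the appends is unreachable inside Pre_ (Source B subscripts best,
-- a TypeError when it stayed None, which only happens on an empty zip).
def trin_vinkel_alt (theta : List Int) (r : List Int) (trin : Int) : List Int × List Int :=
  let first := pvFirstDict (theta.zip r)
  let vs := PySem.List.sorted first.keys (fun v => v) false
  let res := (PySem.List.pyRange 0 360 trin).foldl (fun (acc : List Int × List Int) c =>
    let lo := pvBisect vs c 0 vs.length
    let cand := PySem.List.slice vs (some (max ((lo : Int) - 1) 0)) (some ((lo : Int) + 1))
    let b := (pvBest first c cand).getD (0, 0, 0, 0)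
    (acc.1 ++ [b.2.2.1], acc.2 ++ [b.2.2.2]))
    ([], [])
  (res.2, res.1)

-- ===== PRECONDITION & SPEC =====
-- Pre_ excludes trin = 0 (Python's range raises ValueError) and the inputs with a positive
-- step but an empty zip of theta and r, on which A returns lists of None — not values of the
-- declared List Int type (B raises TypeError there).
def Pre_trin_vinkel (theta : List Int) (r : List Int) (trin : Int) : Prop :=
  trin ≠ 0 ∧ (0 < trin → (theta ≠ [] ∧ r ≠ []))
instance (theta : List Int) (r : List Int) (trin : Int) : Decidable (Pre_trin_vinkel theta r trin) := by unfold Pre_trin_vinkel; infer_instance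
def pvWitness_trin_vinkel : List Int × List Int × Int := ([10, 200, 355], [1, 2, 3], 90)

def Spec_trin_vinkel (theta : List Int) (r : List Int) (trin : Int) (out : List Int × List Int) : Prop := out = trin_vinkel_alt theta r trin
instance (theta : List Int) (r : List Int) (trin : Int) (out : List Int × List Int) : Decidable (Spec_trin_vinkel theta r trin out) := by unfold Spec_trin_vinkel; infer_instance

-- ===== CLAIM (what is proved, stated in full; the proofs are below) =====
def Claim_equal_trin_vinkel : Prop := ∀ (theta : List Int) (r : List Int) (trin : Int), Dom_trin_vinkel theta r trin → Pre_trin_vinkel theta r trin → Spec_trin_vinkel theta r trin (trin_vinkel theta r trin)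

-- ===== LEMMAS AND PROOFS =====

-- the key both programs minimise: distance of a data pair's angle to the target c
def pvKey (c : Int) (p : Int × Int) : Int := |c - p.1|

-- the step of PySem.List.min? (A's inner loop keeps the FIRST minimum, exactly min?)
def pvMinStep (k : Int × Int → Int) (acc : Option (Int × Int)) (x : Int × Int) :
    Option (Int × Int) :=
  match acc with
  | none => some x
  | some m => if k x < k m then some x else some m

theorem pv_min?_eq_foldl (xs : List (Int × Int)) (k : Int × Int → Int) :
    PySem.List.min? xs k = xs.foldl (pvMinStep k) none := by
  unfold PySem.List.min?
  congr 1
  funext acc x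
  cases acc <;> rfl

-- min? from a state already minimal stays put
theorem pv_W1 (k : Int × Int → Int) (l : List (Int × Int)) (m : Int × Int)
    (h : ∀ q ∈ l, k m ≤ k q) : l.foldl (pvMinStep k) (some m) = some m := by
  induction l with
  | nil => rfl
  | cons q l ih =>
    have hq := h q (by simp)
    simp only [List.foldl, pvMinStep, if_neg (by omega : ¬ k q < k m)]
    exact ih (fun x hx => h x (by simp [hx]))

theorem pv_W2 (k : Int × Int → Int) (l1 l2 : List (Int × Int)) (m a : Int × Int)
    (ha : k m < k a) (h1 : ∀ q ∈ l1, k m < k q) (h2 : ∀ q ∈ l2, k m ≤ k q) :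
    (l1 ++ m :: l2).foldl (pvMinStep k) (some a) = some m := by
  induction l1 generalizing a with
  | nil =>
    simp only [List.nil_append, List.foldl, pvMinStep, if_pos ha]
    exact pv_W1 k l2 m h2
  | cons q l1 ih =>
    have hq := h1 q (by simp)
    simp only [List.cons_append, List.foldl, pvMinStep]
    by_cases hc : k q < k a
    · simp only [if_pos hc]
      exact ih q hq (fun x hx => h1 x (by simp [hx]))
    · simp only [if_neg hc]
      exact ih a ha (fun x hx => h1 x (by simp [hx]))

-- the first minimum characterises min?
theorem pv_W0 (k : Int × Int → Int) (l1 l2 : List (Int × Int)) (m : Int × Int)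
    (h1 : ∀ q ∈ l1, k m < k q) (h2 : ∀ q ∈ l2, k m ≤ k q) :
    PySem.List.min? (l1 ++ m :: l2) k = some m := by
  rw [pv_min?_eq_foldl]
  cases l1 with
  | nil =>
    simp only [List.nil_append, List.foldl, pvMinStep]
    exact pv_W1 k l2 m h2
  | cons q l1 =>
    simp only [List.cons_append, List.foldl, pvMinStep]
    exact pv_W2 k l1 l2 m q (h1 q (by simp)) (fun x hx => h1 x (by simp [hx])) h2

-- A's inner triple state tracks (key of best, best) of the min? fold
def pvRelK (k : Int × Int → Int) : Option (Int × Int) → Option Int × Option Int × Option Int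
  | none => (none, none, none)
  | some m => (some (k m), some m.1, some m.2)

theorem pv_inner_rel (c : Int) (ps : List (Int × Int)) (st : Option (Int × Int)) :
    ps.foldl
      (fun (st : Option Int × Option Int × Option Int) p =>
        let diff := |c - p.1|
        match st.1 with
        | none => (some diff, some p.1, some p.2)
        | some m => if diff < m then (some diff, some p.1, some p.2) else st)
      (pvRelK (pvKey c) st)
    = pvRelK (pvKey c) (ps.foldl (pvMinStep (pvKey c)) st) := by
  induction ps generalizing st with
  | nil => rfl
  | cons p ps ih =>
    simp only [List.foldl]
    rw [show (let diff := |c - p.1|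
        match (pvRelK (pvKey c) st).1 with
        | none => (some diff, some p.1, some p.2)
        | some m => if diff < m then (some diff, some p.1, some p.2) else pvRelK (pvKey c) st)
        = pvRelK (pvKey c) (pvMinStep (pvKey c) st p) from by
      cases st with
      | none => rfl
      | some b =>
        simp only [pvRelK, pvMinStep, pvKey]
        split_ifs <;> rfl]
    exact ih _


-- Dict facts for the first-occurrence build (insert only happens when the key is absent)
theorem pv_contains_iff (d : PySem.Dict Int (Int × Int)) (v : Int) :
    d.contains v = true ↔ (d.get? v).isSome = true := by
  simp [PySem.Dict.contains, PySem.Dict.get?, List.any_eq_true, List.find?_isSome]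

theorem pv_mem_keys (d : PySem.Dict Int (Int × Int)) (v : Int) :
    v ∈ d.keys ↔ (d.get? v).isSome = true := by
  simp only [PySem.Dict.keys, PySem.Dict.get?, Option.isSome_map, List.mem_map,
    List.find?_isSome]
  constructor
  · rintro ⟨p, hp, rfl⟩; exact ⟨p, hp, by simp⟩
  · rintro ⟨p, hp, h⟩; exact ⟨p, hp, by simpa using h⟩

theorem pv_firstfold_get (e : List (Int × Int × Int)) (d : PySem.Dict Int (Int × Int)) (v : Int) :
    (e.foldl (fun d q => if d.contains q.2.1 then d else d.insert q.2.1 (q.1, q.2.2)) d).get? v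
    = (d.get? v).or ((e.find? (fun q => q.2.1 == v)).map (fun q => (q.1, q.2.2))) := by
  induction e generalizing d with
  | nil => simp
  | cons q e ih =>
    simp only [List.foldl]
    by_cases hc : d.contains q.2.1 = true
    · rw [if_pos hc, ih]
      by_cases hv : q.2.1 = v
      · obtain ⟨x, hx⟩ := Option.isSome_iff_exists.mp ((pv_contains_iff d v).mp (hv ▸ hc))
        simp [hx, List.find?, hv]
      · rw [List.find?_cons_of_neg (by simp [hv])]
    · rw [if_neg hc, ih, PySem.Dict.get?_insert]
      have hnone : d.get? q.2.1 = none := by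
        by_contra h
        exact hc ((pv_contains_iff d q.2.1).mpr (Option.isSome_iff_ne_none.mpr h))
      by_cases hv : v = q.2.1
      · subst hv
        simp [hnone, List.find?]
      · rw [if_neg hv, List.find?_cons_of_neg (by simp only [beq_iff_eq]; exact fun h => hv (Eq.symm h))]

theorem pv_firstfold_nodup (e : List (Int × Int × Int)) (d : PySem.Dict Int (Int × Int))
    (hd : d.keys.Nodup) :
    (e.foldl (fun d q => if d.contains q.2.1 then d else d.insert q.2.1 (q.1, q.2.2)) d).keys.Nodup := by
  induction e generalizing d with
  | nil => exact hd
  | cons q e ih =>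
    simp only [List.foldl]
    by_cases hc : d.contains q.2.1 = true
    · rw [if_pos hc]; exact ih d hd
    · rw [if_neg hc]
      refine ih _ ?_
      have hk : q.2.1 ∉ d.keys := by
        intro hmem
        exact hc ((pv_contains_iff d q.2.1).mpr ((pv_mem_keys d q.2.1).mp hmem))
      unfold PySem.Dict.insert
      rw [if_neg hc]
      have hkeys2 : (PySem.Dict.mk (d.items ++ [(q.2.1, (q.1, q.2.2))]) : PySem.Dict Int (Int × Int)).keys = d.keys ++ [q.2.1] := by
        simp [PySem.Dict.keys]
      rw [hkeys2]
      exact hd.append (List.nodup_singleton _) (by simpa [List.disjoint_singleton] using hk)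


-- enumerate(zip(theta, r)) pairs every element with its position
theorem pv_enum_length (ps : List (Int × Int)) (s : Int) :
    (PySem.List.enumerate ps s).length = ps.length := by
  induction ps generalizing s with
  | nil => rfl
  | cons p ps ih => simp [PySem.List.enumerate, ih]

theorem pv_enum_getElem (ps : List (Int × Int)) (s : Int) (n : Nat) (h : n < ps.length)
    (h' : n < (PySem.List.enumerate ps s).length) :
    (PySem.List.enumerate ps s)[n] = (s + n, ps[n]) := by
  induction ps generalizing s n with
  | nil => simp at h
  | cons p ps ih =>
    cases n with
    | zero => simp [PySem.List.enumerate]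
    | succ n =>
      have := ih (s + 1) n (by simpa using h) (by simpa [PySem.List.enumerate, pv_enum_length] using h)
      simp only [PySem.List.enumerate, List.getElem_cons_succ, this]
      rw [Prod.mk.injEq]
      exact ⟨by push_cast; ring, rfl⟩

-- first-occurrence characterisation of Source B's dict
theorem pv_first_occ (ps : List (Int × Int)) (v i rad : Int)
    (h : (pvFirstDict ps).get? v = some (i, rad)) :
    ∃ n : Nat, i = (n : Int) ∧ ∃ hn : n < ps.length,
      ps[n] = (v, rad) ∧ ∀ k (hk : k < ps.length), k < n → (ps[k]).1 ≠ v := by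
  rw [pvFirstDict, pv_firstfold_get] at h
  simp only [PySem.Dict.empty, PySem.Dict.get?, List.find?_nil, Option.map_none, Option.none_or] at h
  obtain ⟨q, hq, hq2⟩ := Option.map_eq_some_iff.mp h
  obtain ⟨hpred, as, bs, hsplit, hnot⟩ := List.find?_eq_some_iff_append.mp hq
  have hlen : (PySem.List.enumerate ps 0).length = ps.length := pv_enum_length ps 0
  have hnlt : as.length < (PySem.List.enumerate ps 0).length := by
    rw [hsplit]; simp
  have heq : (PySem.List.enumerate ps 0)[as.length] = q := by
    rw [List.getElem_of_eq hsplit, List.getElem_append_right (by omega)]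
    simp
  rw [pv_enum_getElem ps 0 as.length (by omega) hnlt] at heq
  have hfst : (0 : Int) + (as.length : Int) = q.1 := congrArg Prod.fst heq
  have hsnd : ps[as.length]'(by omega) = q.2 := congrArg Prod.snd heq
  have hi : q.1 = i := congrArg Prod.fst hq2
  have hrad : q.2.2 = rad := congrArg Prod.snd hq2
  have hv : q.2.1 = v := by simpa using hpred
  refine ⟨as.length, by omega, by omega, ?_, ?_⟩
  · rw [hsnd]
    exact Prod.ext hv hrad
  · intro k hk hkn
    have hke : k < (PySem.List.enumerate ps 0).length := by omega
    have heqk : (PySem.List.enumerate ps 0)[k]'hke = as[k]'hkn := by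
      rw [List.getElem_of_eq hsplit, List.getElem_append_left hkn]
    have hnp := hnot _ (List.getElem_mem hkn)
    rw [pv_enum_getElem ps 0 k hk hke] at heqk
    intro hcon
    rw [← heqk] at hnp
    simp [hcon] at hnp

-- the hand-written bisect_left: everything before the result is < c, everything from it on is ≥ c
theorem pvBisect_spec (vs : List Int) (c : Int) (lo hi : Nat)
    (hs : List.Pairwise (fun a b => a ≤ b) vs) (h1 : lo ≤ hi) (h2 : hi ≤ vs.length)
    (hlo : ∀ k (hk : k < vs.length), k < lo → vs[k] < c)
    (hhi : ∀ k (hk : k < vs.length), hi ≤ k → c ≤ vs[k]) :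
    pvBisect vs c lo hi ≤ vs.length ∧
    (∀ k (hk : k < vs.length), k < pvBisect vs c lo hi → vs[k] < c) ∧
    (∀ k (hk : k < vs.length), pvBisect vs c lo hi ≤ k → c ≤ vs[k]) := by
  have hmono : ∀ (a b : Nat) (ha : a < vs.length) (hb : b < vs.length), a ≤ b → vs[a] ≤ vs[b] := by
    intro a b ha hb hab
    rcases Nat.lt_or_ge a b with h | h
    · exact (List.pairwise_iff_getElem.mp hs) a b ha hb h
    · have : a = b := by omega
      subst this; rfl
  revert h1 h2 hlo hhi
  induction lo, hi using pvBisect.induct (vs := vs) (c := c) with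
  | case1 lo hi hlt mid hcmp ih =>
    intro h1 h2 hlo hhi
    rw [pvBisect, dif_pos hlt, if_pos hcmp]
    refine ih (show (lo + hi) / 2 + 1 ≤ hi by omega) h2 ?_ hhi
    intro k hk hklt
    have hmid : (lo + hi) / 2 < vs.length := by omega
    rw [List.getD_eq_getElem vs 0 hmid] at hcmp
    calc vs[k] ≤ vs[(lo + hi) / 2] := hmono k _ hk hmid (by omega)
    _ < c := hcmp
  | case2 lo hi hlt mid hcmp ih =>
    intro h1 h2 hlo hhi
    rw [pvBisect, dif_pos hlt, if_neg hcmp]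
    refine ih (show lo ≤ (lo + hi) / 2 by omega) (show (lo + hi) / 2 ≤ vs.length by omega) hlo ?_
    intro k hk hge
    have hmid : (lo + hi) / 2 < vs.length := by omega
    rw [List.getD_eq_getElem vs 0 hmid] at hcmp
    rw [Int.not_lt] at hcmp
    calc c ≤ vs[(lo + hi) / 2] := hcmp
    _ ≤ vs[k] := hmono _ k hmid hk hge
  | case3 lo hi hnlt =>
    intro h1 h2 hlo hhi
    rw [pvBisect, dif_neg hnlt]
    exact ⟨by omega, fun k hk hklt => hlo k hk (by omega), fun k hk hge => hhi k hk (by omega)⟩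


-- Source B's candidate window vs[max(lo-1,0):lo+1] written out by position
theorem pv_slice_shape (vs : List Int) (j : Nat) (hj : j ≤ vs.length) (h0 : 0 < vs.length) :
    PySem.List.slice vs (some (max ((j : Int) - 1) 0)) (some ((j : Int) + 1))
    = (if j = 0 then [] else [vs.getD (j - 1) 0]) ++ (if j < vs.length then [vs.getD j 0] else []) := by
  simp only [PySem.List.slice, PySem.List.clampIdx]
  rw [if_neg (by omega : ¬ ((j : Int) - 1) ⊔ 0 < 0), if_neg (by omega : ¬ ((j : Int) + 1) < 0)]
  have hA : (((j : Int) - 1) ⊔ 0).toNat = j - 1 := by omega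
  have hB : (((j : Int) + 1)).toNat = j + 1 := by omega
  rw [hA, hB, Nat.min_eq_left (by omega : j - 1 ≤ vs.length)]
  rcases Nat.eq_zero_or_pos j with hj0 | hjpos
  · subst hj0
    simp only [if_pos h0, Nat.zero_sub, List.drop_zero]
    have hmin : min (0 + 1) vs.length = 1 := by omega
    rw [hmin]
    cases vs with
    | nil => simp at h0
    | cons a l => simp [List.getD]
  · rw [if_neg (by omega : ¬ j = 0)]
    rcases Nat.lt_or_ge j vs.length with hlt | hge
    · rw [if_pos hlt, Nat.min_eq_left (by omega : j + 1 ≤ vs.length)]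
      have hd1 : j - 1 < vs.length := by omega
      have hstep : j - 1 + 1 = j := by omega
      have hdrop : List.drop (j - 1) vs = vs[j - 1] :: vs[j] :: List.drop (j + 1) vs := by
        rw [List.drop_eq_getElem_cons hd1, hstep, List.drop_eq_getElem_cons hlt]
      have htake : j + 1 - (j - 1) = 2 := by omega
      rw [htake, hdrop, List.getD_eq_getElem vs 0 hd1, List.getD_eq_getElem vs 0 hlt]
      rfl
    · have hj' : j = vs.length := by omega
      subst hj'
      rw [if_neg (by omega : ¬ vs.length < vs.length), Nat.min_eq_right (by omega : vs.length ≤ vs.length + 1)]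
      have hd1 : vs.length - 1 < vs.length := by omega
      rw [List.drop_eq_getElem_cons hd1]
      have htake : vs.length - (vs.length - 1) = 1 := by omega
      rw [htake]
      have hnil : List.drop (vs.length - 1 + 1) vs = [] := List.drop_eq_nil_of_le (by omega)
      rw [hnil, List.getD_eq_getElem vs 0 hd1]
      rfl

-- the enumerated list projects back to the data
theorem pv_enum_map_snd (ps : List (Int × Int)) (s : Int) :
    (PySem.List.enumerate ps s).map Prod.snd = ps := by
  induction ps generalizing s with
  | nil => rfl
  | cons p ps ih => simp [PySem.List.enumerate, ih]

-- a value is in the dict exactly when it occurs in the data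
theorem pv_get_isSome_iff (ps : List (Int × Int)) (v : Int) :
    ((pvFirstDict ps).get? v).isSome = true ↔ ∃ p ∈ ps, p.1 = v := by
  rw [pvFirstDict, pv_firstfold_get]
  simp only [PySem.Dict.empty, PySem.Dict.get?, List.find?_nil, Option.map_none, Option.none_or,
    Option.isSome_map, List.find?_isSome]
  constructor
  · rintro ⟨q, hq, hpred⟩
    exact ⟨q.2, by rw [← pv_enum_map_snd ps 0]; exact List.mem_map_of_mem hq, by simpa using hpred⟩
  · rintro ⟨p, hp, hpv⟩
    rw [← pv_enum_map_snd ps 0] at hp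
    obtain ⟨q, hq, hq2⟩ := List.mem_map.mp hp
    exact ⟨q, hq, by simp [hq2, hpv]⟩


-- unfoldings of Source B's candidate loop on the one- and two-element windows
theorem pvBest_one (first : PySem.Dict Int (Int × Int)) (c u : Int) :
    pvBest first c [u]
    = some (|c - u|, ((first.get? u).getD (0, 0)).1, u, ((first.get? u).getD (0, 0)).2) := rfl

theorem pvBest_two (first : PySem.Dict Int (Int × Int)) (c u1 u2 : Int) :
    pvBest first c [u1, u2]
    = (if |c - u2| < |c - u1| then
        some (|c - u2|, ((first.get? u2).getD (0, 0)).1, u2, ((first.get? u2).getD (0, 0)).2)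
      else if |c - u2| = |c - u1| ∧ ((first.get? u2).getD (0, 0)).1 < ((first.get? u1).getD (0, 0)).1 then
        some (|c - u2|, ((first.get? u2).getD (0, 0)).1, u2, ((first.get? u2).getD (0, 0)).2)
      else some (|c - u1|, ((first.get? u1).getD (0, 0)).1, u1, ((first.get? u1).getD (0, 0)).2)) := rfl

-- what Source B's binary search + candidate loop picks: the value nearest to c,
-- ties resolved towards the smaller stored (= first-occurrence) index
theorem pv_choice (first : PySem.Dict Int (Int × Int)) (vs : List Int) (c : Int)
    (hne : vs ≠ [])
    (hpair : List.Pairwise (fun a b => a ≤ b) vs)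
    (hnd : vs.Nodup)
    (hget : ∀ u ∈ vs, ((first.get? u).isSome) = true)
    (hinj : ∀ u u' : Int, u ∈ vs → u' ∈ vs → ∀ i rad rad',
      first.get? u = some (i, rad) → first.get? u' = some (i, rad') → u = u') :
    ∃ vb ib radb,
      first.get? vb = some (ib, radb) ∧ vb ∈ vs ∧
      pvBest first c (PySem.List.slice vs
          (some (max ((pvBisect vs c 0 vs.length : Int) - 1) 0))
          (some ((pvBisect vs c 0 vs.length : Int) + 1)))
        = some (|c - vb|, ib, vb, radb) ∧
      (∀ w ∈ vs, |c - vb| ≤ |c - w|) ∧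
      (∀ w ∈ vs, w ≠ vb → |c - w| = |c - vb| →
        ∀ iw radw, first.get? w = some (iw, radw) → ib < iw) := by
  have h0 : 0 < vs.length := List.length_pos_iff.mpr hne
  obtain ⟨hjle, hltc, hgec⟩ := pvBisect_spec vs c 0 vs.length hpair (by omega) le_rfl
    (fun k hk hklt => by omega) (fun k hk hge => by omega)
  have hsmono : ∀ (a b : Nat) (ha : a < vs.length) (hb : b < vs.length), a < b → vs[a] < vs[b] := by
    intro a b ha hb hab
    have hle := (List.pairwise_iff_getElem.mp hpair) a b ha hb hab
    have hne' : vs[a] ≠ vs[b] := by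
      intro hcon
      have := (List.Nodup.getElem_inj_iff hnd).mp hcon
      omega
    omega
  have habs_lt : ∀ (k : Nat) (hk : k < vs.length), k < pvBisect vs c 0 vs.length →
      |c - vs[k]| = c - vs[k] := by
    intro k hk hklt
    have := hltc k hk hklt
    exact abs_of_nonneg (by omega)
  have habs_ge : ∀ (k : Nat) (hk : k < vs.length), pvBisect vs c 0 vs.length ≤ k →
      |c - vs[k]| = vs[k] - c := by
    intro k hk hge
    have := hgec k hk hge
    rw [abs_sub_comm]
    exact abs_of_nonneg (by omega)
  rw [pv_slice_shape vs (pvBisect vs c 0 vs.length) hjle h0]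
  by_cases hj0 : pvBisect vs c 0 vs.length = 0
  · -- window is [vs[0]]: everything in vs is ≥ c
    rw [hj0]
    rw [if_pos rfl, if_pos h0, List.nil_append, List.getD_eq_getElem vs 0 h0]
    obtain ⟨⟨ib, radb⟩, hp⟩ := Option.isSome_iff_exists.mp (hget _ (vs.getElem_mem h0))
    refine ⟨vs[0], ib, radb, hp, vs.getElem_mem h0, ?_, ?_, ?_⟩
    · rw [pvBest_one, hp]
      rfl
    · intro w hw
      obtain ⟨k, hk, rfl⟩ := List.mem_iff_getElem.mp hw
      rcases Nat.eq_zero_or_pos k with hk0 | hkpos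
      · subst hk0; rfl
      · rw [habs_ge 0 h0 (by omega), habs_ge k hk (by omega)]
        have := hsmono 0 k h0 hk hkpos
        omega
    · intro w hw hwne hweq iw radw hgw
      obtain ⟨k, hk, rfl⟩ := List.mem_iff_getElem.mp hw
      rcases Nat.eq_zero_or_pos k with hk0 | hkpos
      · exact absurd (by subst hk0; rfl) hwne
      · rw [habs_ge 0 h0 (by omega), habs_ge k hk (by omega)] at hweq
        have := hsmono 0 k h0 hk hkpos
        omega
  · by_cases hjlen : pvBisect vs c 0 vs.length < vs.length
    · -- window is [vs[j-1], vs[j]]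
      have hj1 : pvBisect vs c 0 vs.length - 1 < vs.length := by omega
      rw [if_neg hj0, if_pos hjlen, List.getD_eq_getElem vs 0 hj1, List.getD_eq_getElem vs 0 hjlen]
      obtain ⟨⟨i1, rad1⟩, hp1⟩ := Option.isSome_iff_exists.mp (hget _ (vs.getElem_mem hj1))
      obtain ⟨⟨i2, rad2⟩, hp2⟩ := Option.isSome_iff_exists.mp (hget _ (vs.getElem_mem hjlen))
      have hd1 : |c - vs[pvBisect vs c 0 vs.length - 1]| = c - vs[pvBisect vs c 0 vs.length - 1] :=
        habs_lt _ hj1 (by omega)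
      have hd2 : |c - vs[pvBisect vs c 0 vs.length]| = vs[pvBisect vs c 0 vs.length] - c :=
        habs_ge _ hjlen (by omega)
      -- every element of vs is at least as far from c as the nearer window end
      have hout : ∀ (k : Nat) (hk : k < vs.length),
          (k < pvBisect vs c 0 vs.length - 1 → |c - vs[pvBisect vs c 0 vs.length - 1]| < |c - vs[k]|) ∧
          (pvBisect vs c 0 vs.length < k → |c - vs[pvBisect vs c 0 vs.length]| < |c - vs[k]|) := by
        intro k hk
        constructor
        · intro hklt
          rw [hd1, habs_lt k hk (by omega)]
          have := hsmono k _ hk hj1 hklt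
          omega
        · intro hkgt
          rw [hd2, habs_ge k hk (by omega)]
          have := hsmono _ k hjlen hk hkgt
          omega
      rw [List.cons_append, List.nil_append, pvBest_two, hp1, hp2]
      simp only [Option.getD_some]
      by_cases hc1 : |c - vs[pvBisect vs c 0 vs.length]| < |c - vs[pvBisect vs c 0 vs.length - 1]|
      · -- right end strictly nearer
        rw [if_pos hc1]
        refine ⟨vs[pvBisect vs c 0 vs.length], i2, rad2, hp2, vs.getElem_mem hjlen, rfl, ?_, ?_⟩
        · intro w hw
          obtain ⟨k, hk, rfl⟩ := List.mem_iff_getElem.mp hw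
          rcases Nat.lt_trichotomy k (pvBisect vs c 0 vs.length) with hklt | hkeq | hkgt
          · rcases Nat.lt_or_ge k (pvBisect vs c 0 vs.length - 1) with h | h
            · have := ((hout k hk).1 h); omega
            · have hk' : k = pvBisect vs c 0 vs.length - 1 := by omega
              subst hk'; omega
          · subst hkeq; exact le_rfl
          · have := ((hout k hk).2 hkgt); omega
        · intro w hw hwne hweq iw radw hgw
          obtain ⟨k, hk, rfl⟩ := List.mem_iff_getElem.mp hw
          rcases Nat.lt_trichotomy k (pvBisect vs c 0 vs.length) with hklt | hkeq | hkgt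
          · rcases Nat.lt_or_ge k (pvBisect vs c 0 vs.length - 1) with h | h
            · have := ((hout k hk).1 h); omega
            · have hk' : k = pvBisect vs c 0 vs.length - 1 := by omega
              subst hk'; omega
          · exact absurd (by subst hkeq; rfl) hwne
          · have := ((hout k hk).2 hkgt); omega
      · rw [if_neg hc1]
        have hle12 : |c - vs[pvBisect vs c 0 vs.length - 1]| ≤ |c - vs[pvBisect vs c 0 vs.length]| := by omega
        by_cases hc2 : |c - vs[pvBisect vs c 0 vs.length]| = |c - vs[pvBisect vs c 0 vs.length - 1]| ∧ i2 < i1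
        · -- tie, right end stored earlier
          rw [if_pos hc2]
          refine ⟨vs[pvBisect vs c 0 vs.length], i2, rad2, hp2, vs.getElem_mem hjlen, rfl, ?_, ?_⟩
          · intro w hw
            obtain ⟨k, hk, rfl⟩ := List.mem_iff_getElem.mp hw
            rcases Nat.lt_trichotomy k (pvBisect vs c 0 vs.length) with hklt | hkeq | hkgt
            · rcases Nat.lt_or_ge k (pvBisect vs c 0 vs.length - 1) with h | h
              · have := ((hout k hk).1 h); omega
              · have hk' : k = pvBisect vs c 0 vs.length - 1 := by omega
                subst hk'; omega
            · subst hkeq; exact le_rfl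
            · have := ((hout k hk).2 hkgt); omega
          · intro w hw hwne hweq iw radw hgw
            obtain ⟨k, hk, rfl⟩ := List.mem_iff_getElem.mp hw
            rcases Nat.lt_trichotomy k (pvBisect vs c 0 vs.length) with hklt | hkeq | hkgt
            · rcases Nat.lt_or_ge k (pvBisect vs c 0 vs.length - 1) with h | h
              · have := ((hout k hk).1 h); omega
              · have hk' : k = pvBisect vs c 0 vs.length - 1 := by omega
                subst hk'
                rw [hp1] at hgw
                have : i1 = iw ∧ rad1 = radw := by
                  have := Option.some.inj hgw
                  exact ⟨congrArg Prod.fst this, congrArg Prod.snd this⟩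
                omega
            · exact absurd (by subst hkeq; rfl) hwne
            · have := ((hout k hk).2 hkgt); omega
        · -- left end wins
          rw [if_neg hc2]
          refine ⟨vs[pvBisect vs c 0 vs.length - 1], i1, rad1, hp1, vs.getElem_mem hj1, rfl, ?_, ?_⟩
          · intro w hw
            obtain ⟨k, hk, rfl⟩ := List.mem_iff_getElem.mp hw
            rcases Nat.lt_trichotomy k (pvBisect vs c 0 vs.length) with hklt | hkeq | hkgt
            · rcases Nat.lt_or_ge k (pvBisect vs c 0 vs.length - 1) with h | h
              · have := ((hout k hk).1 h); omega
              · have hk' : k = pvBisect vs c 0 vs.length - 1 := by omega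
                subst hk'; exact le_rfl
            · subst hkeq; omega
            · have := ((hout k hk).2 hkgt); omega
          · intro w hw hwne hweq iw radw hgw
            obtain ⟨k, hk, rfl⟩ := List.mem_iff_getElem.mp hw
            rcases Nat.lt_trichotomy k (pvBisect vs c 0 vs.length) with hklt | hkeq | hkgt
            · rcases Nat.lt_or_ge k (pvBisect vs c 0 vs.length - 1) with h | h
              · have := ((hout k hk).1 h); omega
              · exact absurd (by
                  have hk' : k = pvBisect vs c 0 vs.length - 1 := by omega
                  subst hk'; rfl) hwne
            · subst hkeq
              rw [hp2] at hgw
              have hiw : i2 = iw ∧ rad2 = radw := by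
                have := Option.some.inj hgw
                exact ⟨congrArg Prod.fst this, congrArg Prod.snd this⟩
              have hne12 : vs[pvBisect vs c 0 vs.length - 1] ≠ vs[pvBisect vs c 0 vs.length] := by
                have := hsmono _ _ hj1 hjlen (by omega)
                omega
              have hi12 : i1 ≠ i2 := by
                intro hcon
                exact hne12 (hinj _ _ (vs.getElem_mem hj1) (vs.getElem_mem hjlen) i1 rad1 rad2 hp1 (by rw [hp2, hcon]))
              -- ¬hc1 and ¬hc2 with the tie force i1 < i2
              have htie : |c - vs[pvBisect vs c 0 vs.length]| = |c - vs[pvBisect vs c 0 vs.length - 1]| := by omega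
              have : ¬ i2 < i1 := fun hlt => hc2 ⟨htie, hlt⟩
              omega
            · have := ((hout k hk).2 hkgt); omega
    · -- window is [vs[len-1]]: everything in vs is < c
      have hj' : pvBisect vs c 0 vs.length = vs.length := by omega
      have hj1 : pvBisect vs c 0 vs.length - 1 < vs.length := by omega
      rw [if_neg hj0, if_neg hjlen, List.append_nil, List.getD_eq_getElem vs 0 hj1]
      obtain ⟨⟨ib, radb⟩, hp⟩ := Option.isSome_iff_exists.mp (hget _ (vs.getElem_mem hj1))
      refine ⟨vs[pvBisect vs c 0 vs.length - 1], ib, radb, hp, vs.getElem_mem hj1, ?_, ?_, ?_⟩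
      · rw [pvBest_one, hp]
        rfl
      · intro w hw
        obtain ⟨k, hk, rfl⟩ := List.mem_iff_getElem.mp hw
        rcases Nat.lt_or_ge k (pvBisect vs c 0 vs.length - 1) with h | h
        · rw [habs_lt _ hj1 (by omega), habs_lt k hk (by omega)]
          have := hsmono k _ hk hj1 h
          omega
        · have hk' : k = pvBisect vs c 0 vs.length - 1 := by omega
          subst hk'; exact le_rfl
      · intro w hw hwne hweq iw radw hgw
        obtain ⟨k, hk, rfl⟩ := List.mem_iff_getElem.mp hw
        rcases Nat.lt_or_ge k (pvBisect vs c 0 vs.length - 1) with h | h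
        · rw [habs_lt _ hj1 (by omega), habs_lt k hk (by omega)] at hweq
          have := hsmono k _ hk hj1 h
          omega
        · exact absurd (by
            have hk' : k = pvBisect vs c 0 vs.length - 1 := by omega
            subst hk'; rfl) hwne


-- two keys sharing a stored first index are the same key
theorem pv_first_inj (ps : List (Int × Int)) (u u' i rad rad' : Int)
    (h : (pvFirstDict ps).get? u = some (i, rad)) (h' : (pvFirstDict ps).get? u' = some (i, rad')) :
    u = u' := by
  obtain ⟨n, hin, hn, hps_n, _⟩ := pv_first_occ ps u i rad h
  obtain ⟨n', hin', hn', hps_n', _⟩ := pv_first_occ ps u' i rad' h'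
  have hnn : n = n' := by omega
  subst hnn
  have h1 : (ps[n]).1 = u := congrArg Prod.fst hps_n
  have h2 : (ps[n]).1 = u' := congrArg Prod.fst hps_n'
  omega

-- per target angle: Source B's pick is exactly the first minimum A's scan keeps
theorem pv_percell (ps : List (Int × Int)) (hps : ps ≠ []) (c : Int) :
    ∃ (m : Int × Int) (dd ii : Int),
      ps.foldl (pvMinStep (pvKey c)) none = some m ∧
      pvBest (pvFirstDict ps) c
        (PySem.List.slice (PySem.List.sorted (pvFirstDict ps).keys (fun v => v) false)
          (some (max ((pvBisect (PySem.List.sorted (pvFirstDict ps).keys (fun v => v) false) c 0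
              (PySem.List.sorted (pvFirstDict ps).keys (fun v => v) false).length : Int) - 1) 0))
          (some ((pvBisect (PySem.List.sorted (pvFirstDict ps).keys (fun v => v) false) c 0
              (PySem.List.sorted (pvFirstDict ps).keys (fun v => v) false).length : Int) + 1)))
        = some (dd, ii, m.1, m.2) := by
  have hkeysnodup : (pvFirstDict ps).keys.Nodup :=
    pv_firstfold_nodup _ PySem.Dict.empty (by simp [PySem.Dict.keys, PySem.Dict.empty])
  have hperm := PySem.List.sorted_perm (pvFirstDict ps).keys (fun v => v) false
  have hvnodup : (PySem.List.sorted (pvFirstDict ps).keys (fun v => v) false).Nodup :=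
    hperm.nodup_iff.mpr hkeysnodup
  have hpair : List.Pairwise (fun a b => a ≤ b)
      (PySem.List.sorted (pvFirstDict ps).keys (fun v => v) false) := by
    simpa using PySem.List.sorted_pairwise (pvFirstDict ps).keys (fun v => v)
  have hmemvs : ∀ v : Int, v ∈ PySem.List.sorted (pvFirstDict ps).keys (fun v => v) false ↔
      ((pvFirstDict ps).get? v).isSome = true := by
    intro v
    rw [hperm.mem_iff]
    exact pv_mem_keys _ v
  have hvne : PySem.List.sorted (pvFirstDict ps).keys (fun v => v) false ≠ [] := by
    cases ps with
    | nil => exact absurd rfl hps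
    | cons p t =>
      intro hcon
      have : p.1 ∈ PySem.List.sorted (pvFirstDict (p :: t)).keys (fun v => v) false := by
        rw [hmemvs, pv_get_isSome_iff]
        exact ⟨p, by simp⟩
      rw [hcon] at this
      simp at this
  obtain ⟨vb, ib, radb, hp, hvbmem, hbest, hFmin, hFtie⟩ :=
    pv_choice (pvFirstDict ps) (PySem.List.sorted (pvFirstDict ps).keys (fun v => v) false) c
      hvne hpair hvnodup
      (fun u hu => (hmemvs u).mp hu)
      (fun u u' _ _ i rad rad' h h' => pv_first_inj ps u u' i rad rad' h h')
  obtain ⟨n, hin, hn, hps_n, hfirstocc⟩ := pv_first_occ ps vb ib radb hp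
  have hvalmem : ∀ (k : Nat) (hk : k < ps.length),
      (ps[k]).1 ∈ PySem.List.sorted (pvFirstDict ps).keys (fun v => v) false := by
    intro k hk
    rw [hmemvs, pv_get_isSome_iff]
    exact ⟨ps[k], List.getElem_mem hk, rfl⟩
  -- split the data at the first occurrence of the chosen value
  have hdrop : ps.drop n = (vb, radb) :: ps.drop (n + 1) := by
    rw [List.drop_eq_getElem_cons hn, hps_n]
  have hsplit : ps = ps.take n ++ (vb, radb) :: ps.drop (n + 1) := by
    conv_lhs => rw [← List.take_append_drop n ps]
    rw [hdrop]
  have h1 : ∀ q ∈ ps.take n, pvKey c (vb, radb) < pvKey c q := by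
    intro q hq
    obtain ⟨k, hk, hkq⟩ := List.mem_take_iff_getElem.mp hq
    have hklt : k < n := by
      have := hk; omega
    have hkps : k < ps.length := by omega
    have hqk : q = ps[k] := by
      rw [← hkq]
    have hwne : (ps[k]).1 ≠ vb := hfirstocc k hkps hklt
    have hle := hFmin _ (hvalmem k hkps)
    rcases lt_or_eq_of_le hle with hlt | heq
    · simp only [pvKey, hqk]
      omega
    · exfalso
      obtain ⟨⟨iw, radw⟩, hgw⟩ := Option.isSome_iff_exists.mp
        ((pv_get_isSome_iff ps (ps[k]).1).mpr ⟨ps[k], List.getElem_mem hkps, rfl⟩)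
      have hlt_iw := hFtie _ (hvalmem k hkps) hwne heq.symm iw radw hgw
      obtain ⟨nw, hinw, hnw, hps_nw, hfw⟩ := pv_first_occ ps (ps[k]).1 iw radw hgw
      have hnwk : ¬ k < nw := fun hcon => (hfw k hkps hcon) rfl
      omega
  have h2 : ∀ q ∈ ps.drop (n + 1), pvKey c (vb, radb) ≤ pvKey c q := by
    intro q hq
    have hqmem : q ∈ ps := List.mem_of_mem_drop hq
    obtain ⟨k, hk, hkq⟩ := List.mem_iff_getElem.mp hqmem
    have := hFmin _ (hvalmem k hk)
    simp only [pvKey, ← hkq]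
    simpa [pvKey] using this
  refine ⟨(vb, radb), |c - vb|, ib, ?_, ?_⟩
  · conv_lhs => rw [hsplit]
    rw [← pv_min?_eq_foldl]
    exact pv_W0 (pvKey c) _ _ _ h1 h2
  · exact hbest


-- a loop appending one element to each of two lists is a pair of maps
theorem pv_outer_map (vals : List Int) (f g : Int → Int) (l1 l2 : List Int) :
    vals.foldl (fun (acc : List Int × List Int) c => (acc.1 ++ [f c], acc.2 ++ [g c])) (l1, l2)
    = (l1 ++ vals.map f, l2 ++ vals.map g) := by
  induction vals generalizing l1 l2 with
  | nil => simp
  | cons c vals ih => simp [List.foldl, ih]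

-- range(0, 360, trin) is empty for negative trin
theorem pv_range_neg (trin : Int) (h : trin < 0) : PySem.List.pyRange 0 360 trin = [] := by
  rw [PySem.List.pyRange]
  rw [if_neg (by omega : ¬ trin = 0)]
  rw [if_neg (by omega : ¬ 0 < trin), if_neg (by omega : ¬ (360 : Int) < 0)]
  rfl

theorem pv_eq_of_ne (theta r : List Int) (trin : Int) (hps : theta.zip r ≠ []) :
    trin_vinkel theta r trin = trin_vinkel_alt theta r trin := by
  unfold trin_vinkel trin_vinkel_alt
  simp only []
  rw [pv_outer_map, pv_outer_map]
  simp only [List.nil_append]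
  have hper : ∀ c : Int,
      (((theta.zip r).foldl
        (fun (st : Option Int × Option Int × Option Int) p =>
          let diff := |c - p.1|
          match st.1 with
          | none => (some diff, some p.1, some p.2)
          | some m => if diff < m then (some diff, some p.1, some p.2) else st)
        (none, none, none)).2.1.getD 0,
       ((theta.zip r).foldl
        (fun (st : Option Int × Option Int × Option Int) p =>
          let diff := |c - p.1|
          match st.1 with
          | none => (some diff, some p.1, some p.2)
          | some m => if diff < m then (some diff, some p.1, some p.2) else st)
        (none, none, none)).2.2.getD 0)
      = ((((pvBest (pvFirstDict (theta.zip r)) c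
          (PySem.List.slice (PySem.List.sorted (pvFirstDict (theta.zip r)).keys (fun v => v) false)
            (some (max ((pvBisect (PySem.List.sorted (pvFirstDict (theta.zip r)).keys (fun v => v) false) c 0
                (PySem.List.sorted (pvFirstDict (theta.zip r)).keys (fun v => v) false).length : Int) - 1) 0))
            (some ((pvBisect (PySem.List.sorted (pvFirstDict (theta.zip r)).keys (fun v => v) false) c 0
                (PySem.List.sorted (pvFirstDict (theta.zip r)).keys (fun v => v) false).length : Int) + 1)))).getD
          (0, 0, 0, 0)).2.2.1),
         (((pvBest (pvFirstDict (theta.zip r)) c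
          (PySem.List.slice (PySem.List.sorted (pvFirstDict (theta.zip r)).keys (fun v => v) false)
            (some (max ((pvBisect (PySem.List.sorted (pvFirstDict (theta.zip r)).keys (fun v => v) false) c 0
                (PySem.List.sorted (pvFirstDict (theta.zip r)).keys (fun v => v) false).length : Int) - 1) 0))
            (some ((pvBisect (PySem.List.sorted (pvFirstDict (theta.zip r)).keys (fun v => v) false) c 0
                (PySem.List.sorted (pvFirstDict (theta.zip r)).keys (fun v => v) false).length : Int) + 1)))).getD
          (0, 0, 0, 0)).2.2.2)) := by
    intro c
    obtain ⟨m, dd, ii, hmin, hbest⟩ := pv_percell (theta.zip r) hps c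
    have hst := pv_inner_rel c (theta.zip r) none
    simp only [pvRelK] at hst
    rw [hmin] at hst
    rw [hst, hbest]
    rfl
  refine Prod.ext ?_ ?_ <;> simp only [] <;>
    refine List.map_congr_left (fun c _ => ?_)
  · exact congrArg Prod.snd (hper c)
  · exact congrArg Prod.fst (hper c)

-- ===== VERDICT (by name: the statement is the Claim_ definition above) =====
theorem trin_vinkel_spec : Claim_equal_trin_vinkel := by
  intro theta r trin _ hpre
  obtain ⟨hz, hpos⟩ := hpre
  unfold Spec_trin_vinkel
  rcases lt_or_gt_of_ne hz with hneg | hpos'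
  · unfold trin_vinkel trin_vinkel_alt
    rw [pv_range_neg trin hneg]
    rfl
  · obtain ⟨ht, hr⟩ := hpos hpos'
    refine pv_eq_of_ne theta r trin ?_
    intro hcon
    have := congrArg List.length hcon
    rw [List.length_zip] at this
    simp at this
    cases theta with
    | nil => exact ht rfl
    | cons a t =>
      cases r with
      | nil => exact hr rfl
      | cons b u => simp at this
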